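-- pv_equiv track=rewrite | github.com/brendangubbins/binarysearch | TaskHare/TaskHare.py | solve
-- ===== SOURCE A (Python) =====
-- def solve(tasks, people):
--
--     if len(tasks) == 0:
--         return 0
--
--     tasks.sort()
--     people.sort()
--     ans = 0
--     j = 0
--
--     for i in range(0, len(people)):
--         if j >= len(tasks):
--             break
--         if people[i] >= tasks[j]:
--             ans += 1
--             j += 1
--
--     return ans
-- ===== SOURCE B (Python) =====
-- def solve(tasks, people):
--     if len(tasks) == 0:
--         return 0
--
--     tasks.sort()
--     people.sort()
--     n, m = len(tasks), len(people)
--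
--     def feasible(k):
--         # the k strongest people can cover the k easiest tasks pairwise
--         return all(people[m - k + i] >= tasks[i] for i in range(k))
--
--     lo, hi = 0, min(n, m)
--     while lo < hi:
--         mid = (lo + hi + 1) // 2
--         if feasible(mid):
--             lo = mid
--         else:
--             hi = mid - 1
--     return lo
-- ===== Notes on version B (the rewrite author's own statement) =====
-- stated objective: alternative
-- what changed: B replaces A's greedy single-pass matching over people by a binary search on the answer k, each candidate k decided by a pairwise feasibility check of the k strongest people against the k easiest tasks.
import Mathlib
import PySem

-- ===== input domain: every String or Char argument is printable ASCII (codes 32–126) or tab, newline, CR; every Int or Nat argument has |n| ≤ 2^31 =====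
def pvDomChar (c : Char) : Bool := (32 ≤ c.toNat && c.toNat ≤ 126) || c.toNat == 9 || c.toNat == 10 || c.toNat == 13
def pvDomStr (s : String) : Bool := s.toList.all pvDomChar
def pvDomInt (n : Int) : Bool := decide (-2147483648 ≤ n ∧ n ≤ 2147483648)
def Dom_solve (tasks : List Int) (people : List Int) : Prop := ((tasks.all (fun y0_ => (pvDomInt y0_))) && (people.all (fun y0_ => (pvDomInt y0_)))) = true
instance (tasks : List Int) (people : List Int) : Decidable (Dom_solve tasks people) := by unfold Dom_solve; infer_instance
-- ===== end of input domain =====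

-- B replaces A's greedy scan over people by a binary search on the answer k, deciding each k
-- by a pairwise feasibility check of the k strongest people against the k easiest tasks
-- (objective: alternative). Both Pythons sort their argument lists in place (except on empty
-- tasks); the equivalence proved here is about the return value only.

-- ===== PORT A =====
-- for i in range(len(people)) with break: structural recursion over the sorted people list,
-- state (ans, j) as in A; tasks[j] is read with getD (the guard ensures j < len).
def solveLoopA (ts : List Int) : List Int → Int → Nat → Int
  | [], ans, _ => ans
  | p :: ps, ans, j =>
    if j ≥ ts.length then ans
    else if p ≥ ts.getD j 0 then solveLoopA ts ps (ans + 1) (j + 1)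
    else solveLoopA ts ps ans j

def solve (tasks : List Int) (people : List Int) : Int :=
  if tasks.length = 0 then 0
  else
    let ts := PySem.List.sorted tasks (fun x => x) false
    let ps := PySem.List.sorted people (fun x => x) false
    solveLoopA ts ps 0 0

-- ===== PORT B =====
-- feasible(k) = all(people[m-k+i] >= tasks[i] for i in range(k)); it is called only with
-- 1 ≤ k ≤ min(len(tasks), len(people)), so every index m-k+i is in range and nonnegative:
-- Nat indices with getD are exact there.
def feasibleB (ps ts : List Int) (k : Nat) : Bool :=
  (List.range k).all (fun i => decide (ps.getD (ps.length - k + i) 0 ≥ ts.getD i 0))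

-- while lo < hi: mid = (lo+hi+1)//2; if feasible(mid): lo = mid else hi = mid-1
-- lo, hi, mid stay ≥ 0 throughout in Python, so Nat arithmetic (incl. //2 and mid-1) is exact;
-- the interval length hi - lo strictly decreases each iteration, so fuel = initial hi - lo
-- (structural, kernel-reducible) bounds the loop without changing its result.
def bsLoopB (ps ts : List Int) : Nat → Nat → Nat → Nat
  | 0, lo, _ => lo
  | fuel + 1, lo, hi =>
    if lo < hi then
      let mid := (lo + hi + 1) / 2
      if feasibleB ps ts mid then bsLoopB ps ts fuel mid hi
      else bsLoopB ps ts fuel lo (mid - 1)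
    else lo

def solve_alt (tasks : List Int) (people : List Int) : Int :=
  if tasks.length = 0 then 0
  else
    let ts := PySem.List.sorted tasks (fun x => x) false
    let ps := PySem.List.sorted people (fun x => x) false
    let n := ts.length
    let m := ps.length
    (bsLoopB ps ts (min n m) 0 (min n m) : Int)

-- ===== PRECONDITION & SPEC =====
def Spec_solve (tasks : List Int) (people : List Int) (out : Int) : Prop := out = solve_alt tasks people
instance (tasks : List Int) (people : List Int) (out : Int) : Decidable (Spec_solve tasks people out) := by unfold Spec_solve; infer_instance

-- ===== CLAIM =====
def Claim_equal_solve : Prop := ∀ (tasks : List Int) (people : List Int), Dom_solve tasks people → Spec_solve tasks people (solve tasks people)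

-- ===== LEMMAS AND PROOFS =====

-- the greedy matching count A computes, in recursive form (people-major)
def fMatch : List Int → List Int → Nat
  | [], _ => 0
  | _ :: _, [] => 0
  | p :: ps, t :: ts => if p ≥ t then fMatch ps ts + 1 else fMatch ps (t :: ts)

theorem fMatch_le_left : ∀ ps ts : List Int, fMatch ps ts ≤ ps.length := by
  intro ps
  induction ps with
  | nil => intro ts; simp [fMatch]
  | cons p ps ih =>
    intro ts
    cases ts with
    | nil => simp [fMatch]
    | cons t ts =>
      by_cases h : p ≥ t <;> simp [fMatch, h] <;>
        [exact ih ts; exact Nat.le_succ_of_le (ih (t :: ts))]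

theorem fMatch_le_right : ∀ ps ts : List Int, fMatch ps ts ≤ ts.length := by
  intro ps
  induction ps with
  | nil => intro ts; simp [fMatch]
  | cons p ps ih =>
    intro ts
    cases ts with
    | nil => simp [fMatch]
    | cons t ts =>
      by_cases h : p ≥ t <;> simp [fMatch, h]
      · exact ih ts
      · exact ih (t :: ts)

-- A's loop computes the greedy count
theorem loopA_eq (ps : List Int) : ∀ (ts : List Int) (ans : Int) (j : Nat),
    solveLoopA ts ps ans j = ans + (fMatch ps (ts.drop j) : Int) := by
  induction ps with
  | nil => intro ts ans j; simp [solveLoopA, fMatch]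
  | cons p ps ih =>
    intro ts ans j
    by_cases hj : j ≥ ts.length
    · have : ts.drop j = [] := List.drop_eq_nil_of_le hj
      simp [solveLoopA, hj, this, fMatch]
    · have hj' : j < ts.length := by omega
      have hdrop : ts.drop j = ts[j] :: ts.drop (j + 1) := List.drop_eq_getElem_cons hj'
      have hgetD : ts.getD j 0 = ts[j] := by
        simp [List.getD_eq_getElem?_getD, List.getElem?_eq_getElem hj']
      simp only [solveLoopA, hj, if_false, hgetD, hdrop, fMatch, ih]
      by_cases hp : p ≥ ts[j]
      · simp [hp]; ring
      · simp [hp]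

-- feasibility lower-bounds the greedy count (no sortedness needed)
theorem feas_le_fMatch : ∀ (ps ts : List Int) (k : Nat),
    k ≤ ps.length → k ≤ ts.length →
    (∀ i, i < k → ts.getD i 0 ≤ ps.getD (ps.length - k + i) 0) →
    k ≤ fMatch ps ts := by
  intro ps
  induction ps with
  | nil =>
    intro ts k hm _ _
    simp only [List.length_nil] at hm
    simp [fMatch]; omega
  | cons p ps ih =>
    intro ts k hm hn hfeas
    cases ts with
    | nil =>
      simp only [List.length_nil] at hn
      simp [fMatch]; omega
    | cons t ts =>
      simp only [List.length_cons] at hm hn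
      by_cases hp : p ≥ t
      · simp only [fMatch, hp, if_true]
        cases k with
        | zero => omega
        | succ k' =>
          have : k' ≤ fMatch ps ts := by
            apply ih ts k' (by omega) (by omega)
            intro i hi
            have h2 := hfeas (i + 1) (by omega)
            have hidx : (p :: ps).length - (k' + 1) + (i + 1) = (ps.length - k' + i) + 1 := by
              simp only [List.length_cons]; omega
            rw [hidx, List.getD_cons_succ, List.getD_cons_succ] at h2
            exact h2
          omega
      · simp only [fMatch, hp, if_false]
        cases k with
        | zero => omega
        | succ k' =>
          -- k cannot use all of p :: ps: index 0 of tasks would need t ≤ p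
          have hk : k' + 1 ≤ ps.length := by
            by_contra hc
            have hklen : k' + 1 = (p :: ps).length := by simp only [List.length_cons]; omega
            have h0 := hfeas 0 (by omega)
            rw [hklen] at h0
            simp at h0
            omega
          apply ih (t :: ts) (k' + 1) hk (by simpa using hn)
          intro i hi
          have h2 := hfeas i hi
          have hidx : (p :: ps).length - (k' + 1) + i = (ps.length - (k' + 1) + i) + 1 := by
            simp only [List.length_cons]; omega
          rw [hidx, List.getD_cons_succ] at h2
          exact h2

-- in a sorted list every in-range element is ≥ the head
theorem sorted_head_le_getD (p : Int) (ps : List Int) (j : Nat)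
    (hs : (p :: ps).Pairwise (· ≤ ·)) (hj : j < (p :: ps).length) :
    p ≤ (p :: ps).getD j 0 := by
  cases j with
  | zero => simp
  | succ j' =>
    have hj' : j' < ps.length := by simpa using hj
    have hmem : ps.getD j' 0 ∈ ps := by
      rw [List.getD_eq_getElem ps 0 hj']
      exact List.getElem_mem hj'
    rw [List.getD_cons_succ]
    exact (List.pairwise_cons.mp hs).1 _ hmem

-- the greedy count is itself feasible (people sorted ascending)
theorem fMatch_feas : ∀ (ps ts : List Int), ps.Pairwise (· ≤ ·) →
    ∀ i, i < fMatch ps ts →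
    ts.getD i 0 ≤ ps.getD (ps.length - fMatch ps ts + i) 0 := by
  intro ps
  induction ps with
  | nil => intro ts _ i hi; simp [fMatch] at hi
  | cons p ps ih =>
    intro ts hs i hi
    have hs' : ps.Pairwise (· ≤ ·) := (List.pairwise_cons.mp hs).2
    cases ts with
    | nil => simp [fMatch] at hi
    | cons t ts =>
      by_cases hp : p ≥ t
      · simp only [fMatch, hp, if_true] at hi ⊢
        have hk' : fMatch ps ts ≤ ps.length := fMatch_le_left ps ts
        cases i with
        | zero =>
          have hidx : (p :: ps).length - (fMatch ps ts + 1) + 0 = ps.length - fMatch ps ts := by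
            simp only [List.length_cons]; omega
          rw [hidx, List.getD_cons_zero]
          exact le_trans hp (sorted_head_le_getD p ps _ hs (by simp only [List.length_cons]; omega))
        | succ i' =>
          have hidx : (p :: ps).length - (fMatch ps ts + 1) + (i' + 1)
              = (ps.length - fMatch ps ts + i') + 1 := by
            simp only [List.length_cons]; omega
          rw [hidx, List.getD_cons_succ, List.getD_cons_succ]
          exact ih ts hs' i' (by omega)
      · simp only [fMatch, hp, if_false] at hi ⊢
        have hk' : fMatch ps (t :: ts) ≤ ps.length := fMatch_le_left ps (t :: ts)
        have hidx : (p :: ps).length - fMatch ps (t :: ts) + i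
            = (ps.length - fMatch ps (t :: ts) + i) + 1 := by
          simp only [List.length_cons]; omega
        rw [hidx, List.getD_cons_succ]
        exact ih (t :: ts) hs' i hi

-- feasibility is downward closed along a sorted people list
theorem feas_antitone (ps ts : List Int) (hs : ps.Pairwise (· ≤ ·)) (j k : Nat)
    (hjk : j ≤ k) (hk : k ≤ ps.length)
    (h : ∀ i, i < k → ts.getD i 0 ≤ ps.getD (ps.length - k + i) 0) :
    ∀ i, i < j → ts.getD i 0 ≤ ps.getD (ps.length - j + i) 0 := by
  intro i hi
  refine le_trans (h i (by omega)) ?_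
  have h1 : ps.length - k + i < ps.length := by omega
  have h2 : ps.length - j + i < ps.length := by omega
  rw [List.getD_eq_getElem ps 0 h1, List.getD_eq_getElem ps 0 h2]
  rcases Nat.lt_or_ge (ps.length - k + i) (ps.length - j + i) with hlt | hge
  · exact (List.pairwise_iff_getElem.mp hs) _ _ h1 h2 hlt
  · have : ps.length - k + i = ps.length - j + i := by omega
    simp [this]

-- unfold the Bool check into the pointwise condition
theorem feasibleB_iff (ps ts : List Int) (k : Nat) :
    feasibleB ps ts k = true ↔ ∀ i, i < k → ts.getD i 0 ≤ ps.getD (ps.length - k + i) 0 := by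
  simp [feasibleB, List.all_eq_true, List.mem_range, ge_iff_le]

-- over a sorted people list, feasibleB k decides k ≤ fMatch (for k within both lengths)
theorem feasibleB_eq_iff (ps ts : List Int) (hs : ps.Pairwise (· ≤ ·)) (k : Nat)
    (hm : k ≤ ps.length) (hn : k ≤ ts.length) :
    (feasibleB ps ts k = true ↔ k ≤ fMatch ps ts) := by
  rw [feasibleB_iff]
  constructor
  · exact fun h => feas_le_fMatch ps ts k hm hn h
  · intro hk
    exact feas_antitone ps ts hs k (fMatch ps ts) hk (fMatch_le_left ps ts)
      (fMatch_feas ps ts hs)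

-- the binary search returns the largest k with feasibleB, i.e. K, given the invariant
theorem bsLoop_eq (ps ts : List Int) (K : Nat) :
    ∀ n lo hi, hi - lo ≤ n → lo ≤ K → K ≤ hi →
    (∀ k, lo < k → k ≤ hi → (feasibleB ps ts k = true ↔ k ≤ K)) →
    bsLoopB ps ts n lo hi = K := by
  intro n
  induction n with
  | zero =>
    intro lo hi hn hlo hhi _
    simp only [bsLoopB]; omega
  | succ n ih =>
    intro lo hi hn hlo hhi hiff
    simp only [bsLoopB]
    by_cases hlt : lo < hi
    · simp only [hlt, if_true]
      by_cases hf : feasibleB ps ts ((lo + hi + 1) / 2) = true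
      · simp only [hf, if_true]
        have hmid := (hiff ((lo + hi + 1) / 2) (by omega) (by omega)).mp hf
        exact ih ((lo + hi + 1) / 2) hi (by omega) hmid hhi
          (fun k h1 h2 => hiff k (by omega) h2)
      · simp only [hf]
        have hmid : ¬ ((lo + hi + 1) / 2 ≤ K) := fun hc =>
          hf ((hiff ((lo + hi + 1) / 2) (by omega) (by omega)).mpr hc)
        exact ih lo ((lo + hi + 1) / 2 - 1) (by omega) hlo (by omega)
          (fun k h1 h2 => hiff k h1 (by omega))
    · simp only [hlt, if_false]; omega

-- ===== VERDICT =====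
theorem solve_spec : Claim_equal_solve := by
  intro tasks people _
  unfold Spec_solve solve solve_alt
  by_cases h : tasks.length = 0
  · simp [h]
  · simp only [h, if_false]
    rw [loopA_eq]
    simp only [List.drop_zero, zero_add]
    have hs : (PySem.List.sorted people (fun x => x) false).Pairwise (· ≤ ·) := by
      simpa using PySem.List.sorted_pairwise people (fun x => x)
    set ts := PySem.List.sorted tasks (fun x => x) false
    set ps := PySem.List.sorted people (fun x => x) false
    have hK : bsLoopB ps ts (min ts.length ps.length) 0 (min ts.length ps.length) = fMatch ps ts := by
      apply bsLoop_eq ps ts (fMatch ps ts) (min ts.length ps.length) 0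
        (min ts.length ps.length) (by omega) (by omega)
      · exact le_min (fMatch_le_right ps ts) (fMatch_le_left ps ts)
      · intro k _ hk2
        exact feasibleB_eq_iff ps ts hs k (le_trans hk2 (min_le_right _ _))
          (le_trans hk2 (min_le_left _ _))
    rw [hK]
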